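-- pv_equiv track=rewrite | github.com/pinthoz/attention-atlas | attention_app/bias/fix_punctuation_labels.py | repair_bio_continuity
-- ===== SOURCE A (Python) =====
-- def repair_bio_continuity(tags: list) -> tuple:
--     """Fix BIO violations after punctuation gets O labels.
--
--     When a punctuation token (now ["O"]) breaks a span, the next token
--     that still has I-X tags becomes invalid — it needs B-X instead.
--
--     For each bias type (STEREO, GEN, UNFAIR) we track whether a span is
--     "open".  If we hit an O token the span closes.  If the next non-O
--     token has I-X without an open span, we promote I-X → B-X.
--
--     Returns (repaired_tags, num_promotions).
--     """
--     # All bias types in the dataset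
--     BIAS_TYPES = ("STEREO", "GEN", "UNFAIR")
--
--     # Track which spans are currently open
--     span_open = {bt: False for bt in BIAS_TYPES}
--     promotions = 0
--
--     repaired = []
--     for tag_list in tags:
--         new_tags = list(tag_list)
--
--         # Check each bias type
--         for bt in BIAS_TYPES:
--             b_tag = f"B-{bt}"
--             i_tag = f"I-{bt}"
--
--             has_b = b_tag in new_tags
--             has_i = i_tag in new_tags
--
--             if has_b:
--                 # B-tag opens/resets the span
--                 span_open[bt] = True
--             elif has_i:
--                 if not span_open[bt]:
--                     # I-tag without open span → promote to B-tag
--                     new_tags = [b_tag if t == i_tag else t for t in new_tags]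
--                     span_open[bt] = True
--                     promotions += 1
--                 # else: span is open, I-tag is valid
--             else:
--                 # This token has neither B nor I for this type → span closes
--                 span_open[bt] = False
--
--         repaired.append(new_tags)
--
--     return repaired, promotions
-- ===== SOURCE B (Python) =====
-- def repair_bio_continuity(tags: list) -> tuple:
--     """Stateless re-implementation: a token's I-X needs promotion exactly when
--     the token has I-X but no B-X and the previous token (the original one; none
--     for the first token) carries neither B-X nor I-X.  All promotions for a
--     token are collected into one substitution map applied in a single pass."""
--     BIAS_TYPES = ("STEREO", "GEN", "UNFAIR")
--     repaired = []
--     promotions = 0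
--     for prev, cur in zip([()] + tags, tags):
--         promo = {f"I-{bt}": f"B-{bt}" for bt in BIAS_TYPES
--                  if f"I-{bt}" in cur and f"B-{bt}" not in cur
--                  and f"B-{bt}" not in prev and f"I-{bt}" not in prev}
--         promotions += len(promo)
--         repaired.append([promo.get(t, t) for t in cur])
--     return repaired, promotions
-- ===== Notes on version B (the rewrite author's own statement) =====
-- stated objective: simpler
-- what changed: Replaces A's mutable span_open state dict and sequential per-type list rewrites by a stateless per-token rule (a type's span is open iff the original previous token carries B-X or I-X) that builds one substitution map per token and applies it in a single pass.
import Mathlib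
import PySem

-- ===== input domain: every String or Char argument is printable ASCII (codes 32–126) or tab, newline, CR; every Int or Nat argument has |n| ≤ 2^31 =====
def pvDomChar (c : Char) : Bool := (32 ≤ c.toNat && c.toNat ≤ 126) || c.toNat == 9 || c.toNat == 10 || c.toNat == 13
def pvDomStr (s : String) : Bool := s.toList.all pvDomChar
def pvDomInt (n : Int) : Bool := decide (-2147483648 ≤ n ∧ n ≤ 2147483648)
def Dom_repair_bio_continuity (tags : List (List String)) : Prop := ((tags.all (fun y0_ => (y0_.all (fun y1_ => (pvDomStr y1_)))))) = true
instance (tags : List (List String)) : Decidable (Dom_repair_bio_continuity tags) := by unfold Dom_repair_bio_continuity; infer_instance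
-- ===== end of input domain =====

-- B replaces A's mutable span_open state dict and sequential per-type rewrites by a stateless
-- per-token rule (look at the original previous token) with one combined substitution map (simpler).

-- ===== PORT A =====
-- inner `for bt in BIAS_TYPES` loop body; state = (new_tags, span_open, promotions)
def pvAInner (st : List String × PySem.Dict String Bool × Int) (bt : String) :
    List String × PySem.Dict String Bool × Int :=
  let b_tag := "B-" ++ bt
  let i_tag := "I-" ++ bt
  let has_b := st.1.contains b_tag
  let has_i := st.1.contains i_tag
  if has_b then (st.1, st.2.1.insert bt true, st.2.2)
  else if has_i then
    if !(st.2.1.getD bt false) then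
      (st.1.map (fun t => if t == i_tag then b_tag else t), st.2.1.insert bt true, st.2.2 + 1)
    else (st.1, st.2.1, st.2.2)
  else (st.1, st.2.1.insert bt false, st.2.2)

-- outer `for tag_list in tags` body; state = (span_open, promotions, repaired)
def pvAStep (st : PySem.Dict String Bool × Int × List (List String)) (tag_list : List String) :
    PySem.Dict String Bool × Int × List (List String) :=
  let r := ["STEREO", "GEN", "UNFAIR"].foldl pvAInner (tag_list, st.1, st.2.1)
  (r.2.1, r.2.2, st.2.2 ++ [r.1])

def repair_bio_continuity (tags : List (List String)) : List (List String) × Int :=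
  let span_open : PySem.Dict String Bool :=
    ["STEREO", "GEN", "UNFAIR"].foldl (fun d bt => d.insert bt false) PySem.Dict.empty
  let r := tags.foldl pvAStep (span_open, 0, [])
  (r.2.2, r.2.1)

-- ===== PORT B =====
-- the dict comprehension: substitution map I-bt ↦ B-bt for every promoted bias type
def pvBPromo (prev cur : List String) : PySem.Dict String String :=
  ["STEREO", "GEN", "UNFAIR"].foldl (fun d bt =>
    if cur.contains ("I-" ++ bt) && !cur.contains ("B-" ++ bt)
        && !prev.contains ("B-" ++ bt) && !prev.contains ("I-" ++ bt) then
      d.insert ("I-" ++ bt) ("B-" ++ bt)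
    else d) PySem.Dict.empty

-- loop body over zip([()] + tags, tags); state = (repaired, promotions)
def pvBStep (st : List (List String) × Int) (pc : List String × List String) :
    List (List String) × Int :=
  let promo := pvBPromo pc.1 pc.2
  (st.1 ++ [pc.2.map (fun t => promo.getD t t)], st.2 + (promo.size : Int))

def repair_bio_continuity_alt (tags : List (List String)) : List (List String) × Int :=
  ((([] : List String) :: tags).zip tags).foldl pvBStep ([], 0)

-- ===== PRECONDITION & SPEC =====
def Spec_repair_bio_continuity (tags : List (List String)) (out : List (List String) × Int) : Prop := out = repair_bio_continuity_alt tags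
instance (tags : List (List String)) (out : List (List String) × Int) : Decidable (Spec_repair_bio_continuity tags out) := by unfold Spec_repair_bio_continuity; infer_instance

-- ===== CLAIM (what is proved, stated in full; the proofs are below) =====
def Claim_equal_repair_bio_continuity : Prop := ∀ (tags : List (List String)), Dom_repair_bio_continuity tags → Spec_repair_bio_continuity tags (repair_bio_continuity tags)

-- ===== LEMMAS AND PROOFS =====

-- "a span of bias type bt is open after this token" — what A's span_open tracks
def pvOpen (tok : List String) (bt : String) : Bool :=
  tok.contains ("B-" ++ bt) || tok.contains ("I-" ++ bt)

theorem contains_map_replace (l : List String) (a i b : String) (ha : a ≠ i) (hab : a ≠ b) :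
    (l.map (fun t => if t == i then b else t)).contains a = l.contains a := by
  induction l with
  | nil => rfl
  | cons x xs ih =>
    simp only [List.map_cons, List.contains_cons, ih]
    by_cases hx : x = i
    · subst hx
      rw [if_pos (by simp), beq_eq_false_iff_ne.mpr hab, beq_eq_false_iff_ne.mpr ha]
    · rw [if_neg (by simpa using hx)]

theorem bool_flag (cb ci pb pi : Bool) :
    (ci && !cb && !pb && !pi) = (!cb && ci && !(pb || pi)) := by
  cases cb <;> cases ci <;> cases pb <;> cases pi <;> rfl

-- one pass of the inner loop, with the promotion flag p abstracted out
theorem pvAInner_eq (bt : String) (cur nt : List String) (so : PySem.Dict String Bool)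
    (promos : Int) (p : Bool)
    (hb : nt.contains ("B-" ++ bt) = cur.contains ("B-" ++ bt))
    (hi : nt.contains ("I-" ++ bt) = cur.contains ("I-" ++ bt))
    (hp : p = (!cur.contains ("B-" ++ bt) && cur.contains ("I-" ++ bt) && !(so.getD bt false))) :
    ∃ so', pvAInner (nt, so, promos) bt =
        ((if p then nt.map (fun t => if t == ("I-" ++ bt) then ("B-" ++ bt) else t) else nt),
         so', promos + (if p then 1 else 0))
      ∧ ∀ k, so'.getD k false = if k = bt then pvOpen cur bt else so.getD k false := by
  simp only [pvAInner, hb, hi]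
  by_cases hcb : ("B-" ++ bt) ∈ cur
  · refine ⟨so.insert bt true, by simp [hp, hcb], fun k => ?_⟩
    by_cases hk : k = bt <;> simp [hk, PySem.Dict.getD_insert, pvOpen, hcb]
  · by_cases hci : ("I-" ++ bt) ∈ cur
    · cases hso : so.getD bt false with
      | false =>
        refine ⟨so.insert bt true, by simp [hp, hcb, hci, hso], fun k => ?_⟩
        by_cases hk : k = bt <;> simp [hk, PySem.Dict.getD_insert, pvOpen, hcb, hci]
      | true =>
        refine ⟨so, by simp [hp, hcb, hci, hso], fun k => ?_⟩
        by_cases hk : k = bt <;> simp [hk, pvOpen, hcb, hci, hso]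
    · refine ⟨so.insert bt false, by simp [hp, hcb, hci], fun k => ?_⟩
      by_cases hk : k = bt <;> simp [hk, PySem.Dict.getD_insert, pvOpen, hcb, hci]

-- B's promotion condition for one bias type
def pvP (prev cur : List String) (bt : String) : Bool :=
  cur.contains ("I-" ++ bt) && !cur.contains ("B-" ++ bt)
    && !prev.contains ("B-" ++ bt) && !prev.contains ("I-" ++ bt)

theorem pvBPromo_eq (prev cur : List String) : pvBPromo prev cur =
    ["STEREO", "GEN", "UNFAIR"].foldl (fun d bt =>
      if pvP prev cur bt then d.insert ("I-" ++ bt) ("B-" ++ bt) else d) PySem.Dict.empty := rfl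

theorem contains_ite_replace (c : Prop) [Decidable c] (l : List String) (a i b : String)
    (ha : a ≠ i) (hab : a ≠ b) :
    (if c then l.map (fun t => if t == i then b else t) else l).contains a = l.contains a := by
  split
  · exact contains_map_replace l a i b ha hab
  · rfl

theorem size_promo (prev cur : List String) : ((pvBPromo prev cur).size : Int) =
    (if pvP prev cur "STEREO" then 1 else 0) + (if pvP prev cur "GEN" then 1 else 0)
      + (if pvP prev cur "UNFAIR" then 1 else 0) := by
  rw [pvBPromo_eq]
  rcases hq1 : pvP prev cur "STEREO" <;> rcases hq2 : pvP prev cur "GEN" <;>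
    rcases hq3 : pvP prev cur "UNFAIR" <;>
      simp [hq1, hq2, hq3, List.foldl_cons, List.foldl_nil] <;> rfl

-- one token: A's inner loop produces exactly B's substituted token and promotion count
theorem token_step (prev cur : List String) (so : PySem.Dict String Bool) (promos : Int)
    (h : ∀ bt ∈ (["STEREO", "GEN", "UNFAIR"] : List String), so.getD bt false = pvOpen prev bt) :
    ∃ so', ["STEREO", "GEN", "UNFAIR"].foldl pvAInner (cur, so, promos)
        = (cur.map (fun t => (pvBPromo prev cur).getD t t), so',
           promos + ((pvBPromo prev cur).size : Int))
      ∧ ∀ bt ∈ (["STEREO", "GEN", "UNFAIR"] : List String), so'.getD bt false = pvOpen cur bt := by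
  have hS := h "STEREO" (by simp)
  have hG := h "GEN" (by simp)
  have hU := h "UNFAIR" (by simp)
  obtain ⟨so1, e1, h1⟩ := pvAInner_eq "STEREO" cur cur so promos (pvP prev cur "STEREO") rfl rfl
    (by simp only [pvP, hS, pvOpen]; exact bool_flag _ _ _ _)
  obtain ⟨so2, e2, h2⟩ := pvAInner_eq "GEN" cur
    (if pvP prev cur "STEREO" then
      cur.map (fun t => if t == ("I-" ++ "STEREO") then ("B-" ++ "STEREO") else t) else cur)
    so1 (promos + (if pvP prev cur "STEREO" then 1 else 0)) (pvP prev cur "GEN")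
    (contains_ite_replace _ _ _ _ _ (by decide) (by decide))
    (contains_ite_replace _ _ _ _ _ (by decide) (by decide))
    (by rw [h1 "GEN", if_neg (by decide)]; simp only [pvP, hG, pvOpen]; exact bool_flag _ _ _ _)
  obtain ⟨so3, e3, h3⟩ := pvAInner_eq "UNFAIR" cur
    (if pvP prev cur "GEN" then
      (if pvP prev cur "STEREO" then
        cur.map (fun t => if t == ("I-" ++ "STEREO") then ("B-" ++ "STEREO") else t) else cur).map
        (fun t => if t == ("I-" ++ "GEN") then ("B-" ++ "GEN") else t)
     else
      (if pvP prev cur "STEREO" then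
        cur.map (fun t => if t == ("I-" ++ "STEREO") then ("B-" ++ "STEREO") else t) else cur))
    so2 (promos + (if pvP prev cur "STEREO" then 1 else 0) + (if pvP prev cur "GEN" then 1 else 0))
    (pvP prev cur "UNFAIR")
    (by rw [contains_ite_replace _ _ _ _ _ (by decide) (by decide),
            contains_ite_replace _ _ _ _ _ (by decide) (by decide)])
    (by rw [contains_ite_replace _ _ _ _ _ (by decide) (by decide),
            contains_ite_replace _ _ _ _ _ (by decide) (by decide)])
    (by rw [h2 "UNFAIR", if_neg (by decide), h1 "UNFAIR", if_neg (by decide)]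
        simp only [pvP, hU, pvOpen]; exact bool_flag _ _ _ _)
  refine ⟨so3, ?_, ?_⟩
  · simp only [List.foldl_cons, List.foldl_nil]
    rw [e1, e2, e3, size_promo, pvBPromo_eq]
    simp only [List.foldl_cons, List.foldl_nil]
    rcases hq1 : pvP prev cur "STEREO" <;> rcases hq2 : pvP prev cur "GEN" <;>
      rcases hq3 : pvP prev cur "UNFAIR" <;>
        simp only [hq1, Bool.false_eq_true, if_false, if_true, Prod.mk.injEq, hq2, hq3] <;>
          refine ⟨?_, by trivial, by omega⟩ <;>
            (try simp only [List.map_map]) <;>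
              (first
                | (refine (List.map_congr_left fun t ht => ?_);
                   by_cases t1 : t = "I-" ++ "STEREO" <;> by_cases t2 : t = "I-" ++ "GEN" <;>
                     by_cases t3 : t = "I-" ++ "UNFAIR" <;>
                       simp_all [PySem.Dict.getD_insert, PySem.Dict.getD_empty])
                | simp [PySem.Dict.getD_empty])
  · intro bt hbt
    fin_cases hbt <;> simp [h3, h2, h1]

-- the whole fold, generalized over the previous token and the accumulators
theorem main_fold (tags : List (List String)) : ∀ (prev : List String)
    (so : PySem.Dict String Bool) (promos : Int) (rep : List (List String)),
    (∀ bt ∈ (["STEREO", "GEN", "UNFAIR"] : List String), so.getD bt false = pvOpen prev bt) →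
    ((tags.foldl pvAStep (so, promos, rep)).2.2, (tags.foldl pvAStep (so, promos, rep)).2.1)
      = ((prev :: tags).zip tags).foldl pvBStep (rep, promos) := by
  induction tags with
  | nil => intro prev so promos rep _; rfl
  | cons cur rest ih =>
    intro prev so promos rep h
    obtain ⟨so', e, h'⟩ := token_step prev cur so promos h
    have eA : pvAStep (so, promos, rep) cur
        = (so', promos + ((pvBPromo prev cur).size : Int),
           rep ++ [cur.map (fun t => (pvBPromo prev cur).getD t t)]) := by
      simp only [pvAStep, e]
    simp only [List.foldl_cons, List.zip_cons_cons, eA]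
    exact ih cur so' _ _ h'

-- ===== VERDICT (by name: the statement is the Claim_ definition above) =====
theorem repair_bio_continuity_spec : Claim_equal_repair_bio_continuity := by
  intro tags _
  show repair_bio_continuity tags = repair_bio_continuity_alt tags
  simp only [repair_bio_continuity, repair_bio_continuity_alt]
  exact main_fold tags []
    (["STEREO", "GEN", "UNFAIR"].foldl (fun d bt => d.insert bt false) PySem.Dict.empty)
    0 [] (by intro bt hbt; fin_cases hbt <;> decide)
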